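-- pv_equiv track=rewrite | github.com/spiritdjy/MixLeetCode | mixleet/leecode/32.py | clear_left_stacks
-- ===== SOURCE A (Python) =====
-- def clear_left_stacks(stack: list):
--     ret = []
--     curr = 0
--     for i in stack:
--         if i > 0:
--             curr += i
--         else:
--             if curr:
--                 ret.append(curr)
--                 curr = 0
--
--     if curr:
--         ret.append(curr)
--
--     return ret
-- ===== SOURCE B (Python) =====
-- def clear_left_stacks(stack: list):
--     # partition into maximal runs of same sign-predicate (x > 0), then
--     # keep the sums of the positive runs
--     groups = []
--     for x in stack:
--         k = x > 0
--         if groups and groups[-1][0] == k: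
--             groups[-1][1].append(x)
--         else:
--             groups.append((k, [x]))
--     return [sum(g) for k, g in groups if k]
-- ===== Notes on version B (the rewrite author's own statement) =====
-- stated objective: idiomatic
-- what changed: B partitions the list into maximal runs keyed by x > 0 (a groupby-style grouping pass) and then emits the sum of each positive run via a comprehension, instead of A's running accumulator with flush-on-nonpositive and a trailing flush.
import Mathlib
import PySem

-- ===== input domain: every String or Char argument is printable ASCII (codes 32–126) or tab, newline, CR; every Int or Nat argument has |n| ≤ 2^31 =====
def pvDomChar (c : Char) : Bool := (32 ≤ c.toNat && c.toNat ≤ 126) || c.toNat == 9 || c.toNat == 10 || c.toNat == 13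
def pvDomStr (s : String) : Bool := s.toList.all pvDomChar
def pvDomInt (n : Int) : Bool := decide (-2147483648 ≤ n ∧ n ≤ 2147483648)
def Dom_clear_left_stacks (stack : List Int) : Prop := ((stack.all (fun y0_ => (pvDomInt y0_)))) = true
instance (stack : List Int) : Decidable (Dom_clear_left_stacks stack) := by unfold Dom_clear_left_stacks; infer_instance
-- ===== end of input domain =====

-- B replaces A's accumulator-and-flush loop by a groupby-style partition into maximal
-- sign-runs followed by summing the positive runs (idiomatic decomposition; same cost).


-- ===== PORT A =====
-- for-loop over (ret, curr); in the else branch curr is appended and reset only when nonzero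
def clear_left_stacks (stack : List Int) : List Int :=
  let st := stack.foldl
    (fun (s : List Int × Int) i =>
      if i > 0 then (s.1, s.2 + i)
      else if s.2 ≠ 0 then (s.1 ++ [s.2], 0) else s)
    ([], 0)
  if st.2 ≠ 0 then st.1 ++ [st.2] else st.1

-- ===== PORT B =====
-- grouping of adjacent elements with equal key (the groupby step of Source B)
def pvGroupByKey (key : Int → Bool) : List Int → List (Bool × List Int)
  | [] => []
  | x :: xs =>
    match pvGroupByKey key xs with
    | (k, g) :: rest =>
      if key x == k then (k, x :: g) :: rest else (key x, [x]) :: (k, g) :: rest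
    | [] => [(key x, [x])]

def clear_left_stacks_alt (stack : List Int) : List Int :=
  (pvGroupByKey (fun x => decide (0 < x)) stack).filterMap
    (fun p => if p.1 then some p.2.sum else none)

-- ===== PRECONDITION & SPEC =====
def Spec_clear_left_stacks (stack : List Int) (out : List Int) : Prop := out = clear_left_stacks_alt stack
instance (stack : List Int) (out : List Int) : Decidable (Spec_clear_left_stacks stack out) := by unfold Spec_clear_left_stacks; infer_instance

-- ===== CLAIM (what is proved, stated in full; the proofs are below) =====
def Claim_equal_clear_left_stacks : Prop := ∀ (stack : List Int), Dom_clear_left_stacks stack → Spec_clear_left_stacks stack (clear_left_stacks stack)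

-- ===== LEMMAS AND PROOFS =====

-- the remaining output A produces from suffix `xs` with running accumulator `c`
def pvRest : List Int → Int → List Int
  | [], c => if c ≠ 0 then [c] else []
  | x :: r, c => if x > 0 then pvRest r (c + x) else if c ≠ 0 then c :: pvRest r 0 else pvRest r 0

theorem pvFoldl_rest (xs : List Int) : ∀ (ret : List Int) (c : Int),
    (let st := xs.foldl
        (fun (s : List Int × Int) i =>
          if i > 0 then (s.1, s.2 + i)
          else if s.2 ≠ 0 then (s.1 ++ [s.2], 0) else s)
        (ret, c)
      if st.2 ≠ 0 then st.1 ++ [st.2] else st.1) = ret ++ pvRest xs c := by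
  induction xs with
  | nil =>
    intro ret c
    simp only [List.foldl_nil, pvRest]
    split <;> simp_all
  | cons x r ih =>
    intro ret c
    simp only [List.foldl_cons]
    by_cases hx : x > 0
    · rw [if_pos hx, ih]
      simp [pvRest, hx]
    · rw [if_neg hx]
      by_cases hc : c ≠ 0
      · rw [if_pos hc, ih]
        simp [pvRest, hx, hc]
      · rw [if_neg hc, ih]
        simp only [ne_eq, not_not] at hc
        simp [pvRest, hx, hc]

-- `pvRest xs c` for positive `c` merges `c` into the leading positive run of `xs` (if any)
def pvMerge (c : Int) (xs : List Int) : List Int :=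
  match pvGroupByKey (fun x => decide (0 < x)) xs with
  | (true, g) :: rest =>
    (c + g.sum) :: rest.filterMap (fun p => if p.1 then some p.2.sum else none)
  | l => c :: l.filterMap (fun p => if p.1 then some p.2.sum else none)

theorem pvRest_char (xs : List Int) : ∀ c : Int, 0 ≤ c →
    pvRest xs c = if 0 < c then pvMerge c xs else clear_left_stacks_alt xs := by
  induction xs with
  | nil =>
    intro c _
    simp only [pvRest, pvMerge, clear_left_stacks_alt, pvGroupByKey]
    split <;> simp_all
    omega
  | cons x r ih =>
    intro c hc
    by_cases hx : x > 0
    · have hcx : 0 ≤ c + x := by omega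
      have h1 := ih (c + x) hcx
      have h2 : pvRest (x :: r) c = pvRest r (c + x) := by simp [pvRest, hx]
      rw [h2, h1]
      have hcx' : 0 < c + x := by omega
      simp only [hcx', if_true]
      by_cases hc0 : 0 < c
      · simp only [hc0, if_true]
        simp only [pvMerge, pvGroupByKey, hx]
        cases hg : pvGroupByKey (fun x => decide (0 < x)) r with
        | nil => simp
        | cons p rest =>
          obtain ⟨k, g⟩ := p
          cases k <;> simp
          ring_nf
      · have hc0' : c = 0 := by omega
        subst hc0'
        simp only [show ¬ (0:Int) < 0 by omega, if_false]
        simp only [clear_left_stacks_alt, pvGroupByKey, hx, pvMerge]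
        cases hg : pvGroupByKey (fun x => decide (0 < x)) r with
        | nil => simp
        | cons p rest =>
          obtain ⟨k, g⟩ := p
          cases k <;> simp
    · have halt : clear_left_stacks_alt (x :: r) = clear_left_stacks_alt r := by
        simp only [clear_left_stacks_alt, pvGroupByKey]
        cases hg : pvGroupByKey (fun x => decide (0 < x)) r with
        | nil => simp [hx]
        | cons p rest =>
          obtain ⟨k, g⟩ := p
          cases k <;> simp [hx]
      have hr0 := ih 0 (le_refl 0)
      simp only [show ¬ (0:Int) < 0 by omega, if_false] at hr0
      by_cases hc0 : 0 < c
      · have : pvRest (x :: r) c = c :: pvRest r 0 := by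
          simp [pvRest, hx]; omega
        rw [this, hr0]
        simp only [hc0, if_true, pvMerge]
        cases hg : pvGroupByKey (fun x => decide (0 < x)) r with
        | nil => simp [clear_left_stacks_alt, pvGroupByKey, hg, hx]
        | cons p rest =>
          obtain ⟨k, g⟩ := p
          cases k <;> simp [clear_left_stacks_alt, pvGroupByKey, hg, hx]
      · have hc0' : c = 0 := by omega
        subst hc0'
        have : pvRest (x :: r) 0 = pvRest r 0 := by simp [pvRest, hx]
        rw [this, hr0, halt]
        simp

-- ===== VERDICT (by name: the statement is the Claim_ definition above) =====
theorem clear_left_stacks_spec : Claim_equal_clear_left_stacks := by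
  intro stack _
  unfold Spec_clear_left_stacks clear_left_stacks
  have h := pvFoldl_rest stack [] 0
  simp only at h
  rw [h]
  have h2 := pvRest_char stack 0 (le_refl 0)
  simp only [show ¬ (0:Int) < 0 by omega, if_false] at h2
  simp [h2]
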